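-- pv_equiv track=rewrite | github.com/Anasstassik/asd_labs | laba4/graph_analyzer.py | build_condensation_graph
-- ===== SOURCE A (Python) =====
-- def build_condensation_graph(original_adj_matrix, scc_list):
--     num_sccs = len(scc_list)
--     if num_sccs == 0: return [], []
--     node_to_scc_map = {node_val - 1: scc_idx
--                        for scc_idx, component_nodes in enumerate(scc_list)
--                        for node_val in component_nodes}
--     condensation_adj_matrix = [[0] * num_sccs for _ in range(num_sccs)]
--     for u_orig in range(len(original_adj_matrix)):
--         for v_orig in range(len(original_adj_matrix)):
--             if original_adj_matrix[u_orig][v_orig] == 1: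
--                 scc_u_idx = node_to_scc_map.get(u_orig)
--                 scc_v_idx = node_to_scc_map.get(v_orig)
--                 if scc_u_idx is not None and scc_v_idx is not None and scc_u_idx != scc_v_idx:
--                     condensation_adj_matrix[scc_u_idx][scc_v_idx] = 1
--     scc_labels_for_graph = [",".join(map(str, scc)) for scc in scc_list]
--     return condensation_adj_matrix, scc_labels_for_graph
-- ===== SOURCE B (Python) =====
-- def build_condensation_graph(original_adj_matrix, scc_list):
--     k = len(scc_list)
--     if k == 0:
--         return [], []
--     n = len(original_adj_matrix)
--     node_to_scc = {node_val - 1: scc_idx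
--                    for scc_idx, component_nodes in enumerate(scc_list)
--                    for node_val in component_nodes}
--     # members[i] = original-graph node indices owned by SCC i (duplicates resolved by the map)
--     members = [[node for node, s in node_to_scc.items() if s == i and 0 <= node < n]
--                for i in range(k)]
--     condensation = [[1 if i != j and any(original_adj_matrix[u][v] == 1
--                                          for u in members[i] for v in members[j])
--                      else 0
--                      for j in range(k)]
--                     for i in range(k)]
--     labels = [",".join(map(str, scc)) for scc in scc_list]
--     return condensation, labels
-- ===== Notes on version B (the rewrite author's own statement) =====
-- stated objective: alternative
-- what changed: Instead of scanning all V×V node pairs and mutating a zero matrix in place, B inverts the node-to-SCC map into per-SCC member lists and builds the condensation matrix directly by comprehension, setting entry (i,j) iff some member of SCC i has an original edge to some member of SCC j.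
import Mathlib
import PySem

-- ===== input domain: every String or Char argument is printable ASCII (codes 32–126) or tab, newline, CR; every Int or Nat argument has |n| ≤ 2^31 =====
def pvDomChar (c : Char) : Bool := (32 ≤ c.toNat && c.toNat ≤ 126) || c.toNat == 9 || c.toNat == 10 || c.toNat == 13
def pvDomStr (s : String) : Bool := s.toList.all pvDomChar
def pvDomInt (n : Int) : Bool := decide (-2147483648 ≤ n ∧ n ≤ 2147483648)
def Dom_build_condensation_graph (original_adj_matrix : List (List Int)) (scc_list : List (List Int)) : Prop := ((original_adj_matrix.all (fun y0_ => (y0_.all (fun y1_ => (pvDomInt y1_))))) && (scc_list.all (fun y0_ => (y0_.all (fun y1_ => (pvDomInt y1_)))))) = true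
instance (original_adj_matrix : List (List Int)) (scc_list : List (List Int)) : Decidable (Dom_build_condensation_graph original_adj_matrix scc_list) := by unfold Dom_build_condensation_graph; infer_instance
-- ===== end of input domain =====

-- B builds the condensation matrix by comprehension from per-SCC member lists instead of mutating a zero matrix during a V×V edge scan (alternative decomposition, similar cost).


-- ===== PORT A =====
-- the dict comprehension {node_val - 1: scc_idx for scc_idx, comp in enumerate(scc_list) for node_val in comp}
-- (this exact line occurs verbatim in both Pythons, so both ports share it)
def nodeMap (scc_list : List (List Int)) : PySem.Dict Int Int :=
  (PySem.List.enumerate scc_list 0).foldl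
    (fun d p => p.2.foldl (fun d v => d.insert (v - 1) p.1) d) PySem.Dict.empty

def build_condensation_graph (original_adj_matrix : List (List Int)) (scc_list : List (List Int)) : List (List Int) × List String :=
  let k := scc_list.length
  if k = 0 then ([], []) else
  let d := nodeMap scc_list
  let n : Int := (original_adj_matrix.length : Int)
  let mat := (PySem.List.pyRange 0 n 1).foldl (fun m u =>
    (PySem.List.pyRange 0 n 1).foldl (fun m v =>
      match (PySem.List.pyGet? original_adj_matrix u).bind (fun row => PySem.List.pyGet? row v) with
      | none => m  -- Python raises IndexError here; Pre_ excludes exactly these inputs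
      | some x =>
        if x = 1 then
          match d.get? u, d.get? v with
          | some i, some j =>
              if i ≠ j then
                -- condensation_adj_matrix[i][j] = 1 ; i, j are valid SCC indices by construction
                PySem.List.pySetD m i (PySem.List.pySetD (PySem.List.pyGetD m i []) j 1)
              else m
          | _, _ => m
        else m) m)
    (List.replicate k (List.replicate k (0 : Int)))
  (mat, scc_list.map (fun scc => PySem.Str.join "," (scc.map PySem.Int.toStr)))

-- ===== PORT B =====
-- members[i] = [node for node, s in node_to_scc.items() if s == i and 0 <= node < n]
def membersOf (d : PySem.Dict Int Int) (n : Int) (i : Int) : List Int :=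
  (d.items.filter (fun p => p.2 == i && decide (0 ≤ p.1 ∧ p.1 < n))).map Prod.fst

def build_condensation_graph_alt (original_adj_matrix : List (List Int)) (scc_list : List (List Int)) : List (List Int) × List String :=
  let k := scc_list.length
  if k = 0 then ([], []) else
  let n : Int := (original_adj_matrix.length : Int)
  let d := nodeMap scc_list
  let ms := (PySem.List.pyRange 0 (k : Int) 1).map (fun i => membersOf d n i)
  let mat := (PySem.List.pyRange 0 (k : Int) 1).map (fun i =>
    (PySem.List.pyRange 0 (k : Int) 1).map (fun j =>
      if i ≠ j ∧ (PySem.List.pyGetD ms i []).any (fun u => (PySem.List.pyGetD ms j []).any (fun v =>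
           ((PySem.List.pyGet? original_adj_matrix u).bind (fun row => PySem.List.pyGet? row v)) == some 1))
      then (1 : Int) else 0))
  (mat, scc_list.map (fun scc => PySem.Str.join "," (scc.map PySem.Int.toStr)))

-- ===== PRECONDITION & SPEC =====
-- Pre_ excludes exactly the inputs where Python A raises IndexError: a nonempty scc_list with some
-- matrix row shorter than the number of rows (the inner loop reads original_adj_matrix[u][v] for all v < len(matrix)).
def Pre_build_condensation_graph (original_adj_matrix : List (List Int)) (scc_list : List (List Int)) : Prop :=
  scc_list = [] ∨ ∀ row ∈ original_adj_matrix, original_adj_matrix.length ≤ row.length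
instance (original_adj_matrix : List (List Int)) (scc_list : List (List Int)) : Decidable (Pre_build_condensation_graph original_adj_matrix scc_list) := by unfold Pre_build_condensation_graph; infer_instance

def pvWitness_build_condensation_graph : List (List Int) × List (List Int) :=
  ([[0, 1], [1, 0]], [[1], [2]])

def Spec_build_condensation_graph (original_adj_matrix : List (List Int)) (scc_list : List (List Int)) (out : List (List Int) × List String) : Prop := out = build_condensation_graph_alt original_adj_matrix scc_list
instance (original_adj_matrix : List (List Int)) (scc_list : List (List Int)) (out : List (List Int) × List String) : Decidable (Spec_build_condensation_graph original_adj_matrix scc_list out) := by unfold Spec_build_condensation_graph; infer_instance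

-- ===== CLAIM (what is proved, stated in full; the proofs are below) =====
def Claim_equal_build_condensation_graph : Prop := ∀ (original_adj_matrix : List (List Int)) (scc_list : List (List Int)), Dom_build_condensation_graph original_adj_matrix scc_list → Pre_build_condensation_graph original_adj_matrix scc_list → Spec_build_condensation_graph original_adj_matrix scc_list (build_condensation_graph original_adj_matrix scc_list)

-- ===== LEMMAS AND PROOFS =====


def readM (M : List (List Int)) (p : Int × Int) : Option Int :=
  (PySem.List.pyGet? M p.1).bind (fun row => PySem.List.pyGet? row p.2)

def Upd (M : List (List Int)) (d : PySem.Dict Int Int) (p : Int × Int) (a b : Nat) : Prop :=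
  readM M p = some 1 ∧ d.get? p.1 = some (a : Int) ∧ d.get? p.2 = some (b : Int) ∧ a ≠ b

def E (m : List (List Int)) (a b : Nat) : Int := (m.getD a []).getD b 0

def stepA (M : List (List Int)) (d : PySem.Dict Int Int) (m : List (List Int)) (p : Int × Int) : List (List Int) :=
  match readM M p with
  | none => m
  | some x =>
    if x = 1 then
      match d.get? p.1, d.get? p.2 with
      | some i, some j =>
        if i ≠ j then PySem.List.pySetD m i (PySem.List.pySetD (PySem.List.pyGetD m i []) j 1) else m
      | _, _ => m
    else m

theorem E_eq_getElem (m : List (List Int)) (a b : Nat) (ha : a < m.length) :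
    E m a b = (m[a]).getD b 0 := by
  unfold E
  congr 1
  rw [List.getD_eq_getElem?_getD, List.getElem?_eq_getElem ha, Option.getD_some]

theorem stepA_props (M : List (List Int)) (d : PySem.Dict Int Int) (k : Nat)
    (hv : ∀ u i, d.get? u = some i → 0 ≤ i ∧ i < (k : Int))
    (m : List (List Int)) (hm : m.length = k) (hr : ∀ r ∈ m, r.length = k) (p : Int × Int) :
    (stepA M d m p).length = k ∧ (∀ r ∈ stepA M d m p, r.length = k) ∧
    (∀ a b : Nat, a < k → b < k →
      (Upd M d p a b → E (stepA M d m p) a b = 1) ∧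
      (¬ Upd M d p a b → E (stepA M d m p) a b = E m a b)) := by
  unfold stepA
  cases hread : readM M p with
  | none =>
    refine ⟨hm, hr, fun a b ha hb => ⟨fun hupd => ?_, fun _ => by trivial⟩⟩
    unfold Upd at hupd
    rw [hread] at hupd
    simp at hupd
  | some x =>
    by_cases hx : x = 1
    · subst hx
      simp only [if_pos]
      cases hg1 : d.get? p.1 with
      | none =>
        refine ⟨hm, hr, fun a b ha hb => ⟨fun hupd => ?_, fun _ => by trivial⟩⟩
        unfold Upd at hupd
        rw [hg1] at hupd
        simp at hupd
      | some i =>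
        cases hg2 : d.get? p.2 with
        | none =>
          refine ⟨hm, hr, fun a b ha hb => ⟨fun hupd => ?_, fun _ => by trivial⟩⟩
          unfold Upd at hupd
          rw [hg2] at hupd
          simp at hupd
        | some j =>
          by_cases hij : i = j
          · simp only [hij, ne_eq, not_true_eq_false, if_false]
            refine ⟨hm, hr, fun a b ha hb => ⟨fun hupd => ?_, fun _ => by trivial⟩⟩
            obtain ⟨-, h2, h3, hne⟩ := hupd
            rw [hg1, hij] at h2
            rw [hg2] at h3
            exact absurd (by
              have := Option.some.inj h2
              have := Option.some.inj h3
              omega : a = b) hne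
          · simp only [ne_eq, hij, not_false_eq_true, if_true]
            obtain ⟨hi0, hik⟩ := hv _ _ hg1
            obtain ⟨hj0, hjk⟩ := hv _ _ hg2
            have hilt : i.toNat < m.length := by omega
            have row_mem : m[i.toNat] ∈ m := List.getElem_mem hilt
            have hrow_len : (m[i.toNat]).length = k := hr _ row_mem
            have hjlt : j.toNat < (m[i.toNat]).length := by omega
            rw [PySem.List.pyGetD_eq_getElem m [] hi0 (by omega),
                PySem.List.pySetD_of_nonneg _ _ hj0,
                PySem.List.pySetD_of_nonneg _ _ hi0]
            refine ⟨by simpa using hm, ?_, ?_⟩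
            · intro r hmem
              rcases List.mem_or_eq_of_mem_set hmem with h | h
              · exact hr _ h
              · subst h; simpa using hrow_len
            · intro a b ha hb
              have key : Upd M d p a b ↔ (a = i.toNat ∧ b = j.toNat) := by
                constructor
                · rintro ⟨-, h2, h3, -⟩
                  rw [hg1] at h2; rw [hg2] at h3
                  have := Option.some.inj h2
                  have := Option.some.inj h3
                  omega
                · rintro ⟨rfl, rfl⟩
                  refine ⟨hread, ?_, ?_, ?_⟩
                  · rw [hg1]; congr 1; omega
                  · rw [hg2]; congr 1; omega
                  · omega
              rw [E_eq_getElem _ _ _ (by simpa [hm] using ha),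
                  E_eq_getElem _ _ _ (by omega)]
              constructor
              · intro hupd
                obtain ⟨rfl, rfl⟩ := key.mp hupd
                rw [List.getElem_set_self (by simpa using hilt)]
                rw [List.getD_eq_getElem?_getD, List.getElem?_set, if_pos rfl, if_pos hjlt]
                rfl
              · intro hupd
                rw [key] at hupd
                by_cases hai : a = i.toNat
                · subst hai
                  rw [List.getElem_set_self (by simpa using hilt)]
                  rw [List.getD_eq_getElem?_getD, List.getElem?_set, if_neg (by tauto),
                      ← List.getD_eq_getElem?_getD]
                · rw [List.getElem_set_ne (by omega)]
    · simp only [if_neg hx]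
      refine ⟨hm, hr, fun a b ha hb => ⟨fun hupd => ?_, fun _ => by trivial⟩⟩
      unfold Upd at hupd
      rw [hread] at hupd
      simp [hx] at hupd

theorem entry_fold (M : List (List Int)) (d : PySem.Dict Int Int) (k : Nat)
    (hv : ∀ u i, d.get? u = some i → 0 ≤ i ∧ i < (k : Int)) :
    ∀ (ps : List (Int × Int)) (m : List (List Int)),
      m.length = k → (∀ r ∈ m, r.length = k) →
      (ps.foldl (stepA M d) m).length = k ∧
      (∀ r ∈ ps.foldl (stepA M d) m, r.length = k) ∧
      (∀ a b : Nat, a < k → b < k →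
        ((∃ p ∈ ps, Upd M d p a b) → E (ps.foldl (stepA M d) m) a b = 1) ∧
        ((¬ ∃ p ∈ ps, Upd M d p a b) → E (ps.foldl (stepA M d) m) a b = E m a b)) := by
  intro ps
  induction ps with
  | nil =>
    intro m hm hr
    exact ⟨hm, hr, fun a b ha hb => ⟨fun ⟨p, hp, _⟩ => absurd hp (List.not_mem_nil), fun _ => by trivial⟩⟩
  | cons p t ih =>
    intro m hm hr
    obtain ⟨h1, h2, h3⟩ := stepA_props M d k hv m hm hr p
    obtain ⟨g1, g2, g3⟩ := ih (stepA M d m p) h1 h2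
    refine ⟨by simpa using g1, by simpa using g2, fun a b ha hb => ⟨?_, ?_⟩⟩
    · rintro ⟨q, hq, hupd⟩
      rcases List.mem_cons.mp hq with rfl | hqt
      · by_cases ht : ∃ q ∈ t, Upd M d q a b
        · simpa using (g3 a b ha hb).1 ht
        · have := (g3 a b ha hb).2 ht
          simp only [List.foldl_cons] at *
          rw [this, (h3 a b ha hb).1 hupd]
      · simpa using (g3 a b ha hb).1 ⟨q, hqt, hupd⟩
    · intro hno
      have hnp : ¬ Upd M d p a b := fun h => hno ⟨p, List.mem_cons_self, h⟩
      have hnt : ¬ ∃ q ∈ t, Upd M d q a b := fun ⟨q, hq, h⟩ => hno ⟨q, List.mem_cons_of_mem _ hq, h⟩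
      have := (g3 a b ha hb).2 hnt
      simp only [List.foldl_cons] at *
      rw [this, (h3 a b ha hb).2 hnp]


theorem inner_nodup (c : List Int) (i : Int) (d : PySem.Dict Int Int) (h : d.keys.Nodup) :
    (c.foldl (fun d v => d.insert (v - 1) i) d).keys.Nodup := by
  induction c generalizing d with
  | nil => exact h
  | cons x t ih => exact ih _ (PySem.Dict.nodup_keys_insert d (x-1) i h)

theorem outer_nodup (l : List (Int × List Int)) (d : PySem.Dict Int Int) (h : d.keys.Nodup) :
    (l.foldl (fun d p => p.2.foldl (fun d v => d.insert (v - 1) p.1) d) d).keys.Nodup := by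
  induction l generalizing d with
  | nil => exact h
  | cons p t ih => exact ih _ (inner_nodup p.2 p.1 d h)

theorem nodeMap_keys_nodup (scc_list : List (List Int)) : (nodeMap scc_list).keys.Nodup := by
  have : (PySem.Dict.empty : PySem.Dict Int Int).keys.Nodup := by
    simp [PySem.Dict.keys, PySem.Dict.empty]
  exact outer_nodup _ _ this

theorem inner_values (c : List Int) (i : Int) (d : PySem.Dict Int Int) :
    ∀ w ∈ (c.foldl (fun d v => d.insert (v - 1) i) d).values, w = i ∨ w ∈ d.values := by
  induction c generalizing d with
  | nil => exact fun w hw => Or.inr hw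
  | cons x t ih =>
    intro w hw
    rcases ih _ w hw with h | h
    · exact Or.inl h
    · exact (PySem.Dict.mem_values_insert d (x-1) i w h).elim Or.inl Or.inr

theorem outer_values (l : List (Int × List Int)) (d : PySem.Dict Int Int) :
    ∀ w ∈ (l.foldl (fun d p => p.2.foldl (fun d v => d.insert (v - 1) p.1) d) d).values,
      (∃ p ∈ l, w = p.1) ∨ w ∈ d.values := by
  induction l generalizing d with
  | nil => exact fun w hw => Or.inr hw
  | cons p t ih =>
    intro w hw
    rcases ih _ w hw with h | h
    · obtain ⟨q, hq, rfl⟩ := h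
      exact Or.inl ⟨q, List.mem_cons_of_mem _ hq, rfl⟩
    · rcases inner_values p.2 p.1 d w h with h' | h'
      · exact Or.inl ⟨p, List.mem_cons_self, h'⟩
      · exact Or.inr h'

theorem nodeMap_values_lt (scc_list : List (List Int)) :
    ∀ u i, (nodeMap scc_list).get? u = some i → 0 ≤ i ∧ i < (scc_list.length : Int) := by
  intro u i h
  have hmem : (u, i) ∈ (nodeMap scc_list).items :=
    PySem.Dict.mem_items_of_get?_eq_some _ h
  have hval : i ∈ (nodeMap scc_list).values := by
    simp only [PySem.Dict.values]
    exact List.mem_map.mpr ⟨(u, i), hmem, rfl⟩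
  rcases outer_values _ _ i hval with h' | h'
  · obtain ⟨p, hp, rfl⟩ := h'
    rw [PySem.List.mem_enumerate_iff] at hp
    obtain ⟨k, hk, rfl⟩ := hp
    exact ⟨by omega, by omega⟩
  · simp [PySem.Dict.values, PySem.Dict.empty] at h'

theorem foldl_nested {α β : Type} (l1 l2 : List α) (F : β → α → α → β) (init : β) :
    l1.foldl (fun m u => l2.foldl (fun m v => F m u v) m) init
      = (l1.flatMap (fun u => l2.map (fun v => (u, v)))).foldl (fun m p => F m p.1 p.2) init := by
  induction l1 generalizing init with
  | nil => rfl
  | cons x t ih => simp [List.foldl_append, List.foldl_map, ih]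

theorem portA_fold_eq (M : List (List Int)) (d : PySem.Dict Int Int) (n : Int) (init : List (List Int)) :
    (PySem.List.pyRange 0 n 1).foldl (fun m u =>
      (PySem.List.pyRange 0 n 1).foldl (fun m v =>
        match (PySem.List.pyGet? M u).bind (fun row => PySem.List.pyGet? row v) with
        | none => m
        | some x =>
          if x = 1 then
            match d.get? u, d.get? v with
            | some i, some j =>
              if i ≠ j then PySem.List.pySetD m i (PySem.List.pySetD (PySem.List.pyGetD m i []) j 1) else m
            | _, _ => m
          else m) m) init
    = ((PySem.List.pyRange 0 n 1).flatMap (fun u => (PySem.List.pyRange 0 n 1).map (fun v => (u, v)))).foldl (stepA M d) init :=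
  foldl_nested _ _ _ init

theorem mem_membersOf (d : PySem.Dict Int Int) (hnd : d.keys.Nodup) (n i u : Int) :
    u ∈ membersOf d n i ↔ d.get? u = some i ∧ 0 ≤ u ∧ u < n := by
  unfold membersOf
  rw [List.mem_map]
  constructor
  · rintro ⟨⟨u', s⟩, hmem, rfl⟩
    rw [List.mem_filter] at hmem
    obtain ⟨hitems, hcond⟩ := hmem
    simp only [beq_iff_eq, Bool.and_eq_true, decide_eq_true_eq] at hcond
    obtain ⟨hs, h0, h1⟩ := hcond
    subst hs
    exact ⟨PySem.Dict.get?_of_mem_items d hitems hnd, h0, h1⟩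
  · rintro ⟨hget, h0, h1⟩
    exact ⟨(u, i), List.mem_filter.mpr ⟨PySem.Dict.mem_items_of_get?_eq_some d hget,
      by simp [h0, h1]⟩, rfl⟩

theorem cond_iff (M : List (List Int)) (scc : List (List Int)) (a b : Nat) :
    (((a : Int) ≠ (b : Int)) ∧
      ((membersOf (nodeMap scc) (M.length : Int) a).any (fun u =>
        (membersOf (nodeMap scc) (M.length : Int) b).any (fun v =>
          readM M (u, v) == some 1)) = true))
    ↔ ∃ p ∈ (PySem.List.pyRange 0 (M.length : Int) 1).flatMap
          (fun u => (PySem.List.pyRange 0 (M.length : Int) 1).map (fun v => (u, v))),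
        Upd M (nodeMap scc) p a b := by
  have hnd := nodeMap_keys_nodup scc
  constructor
  · rintro ⟨hne, hany⟩
    rw [List.any_eq_true] at hany
    obtain ⟨u, hu, hany2⟩ := hany
    rw [List.any_eq_true] at hany2
    obtain ⟨v, hv, hread⟩ := hany2
    rw [beq_iff_eq] at hread
    rw [mem_membersOf _ hnd] at hu hv
    refine ⟨(u, v), ?_, hread, hu.1, hv.1, fun h => hne (by exact_mod_cast congrArg (Nat.cast : Nat → Int) h)⟩
    rw [List.mem_flatMap]
    exact ⟨u, by rw [PySem.List.mem_pyRange_one]; exact ⟨hu.2.1, hu.2.2⟩,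
      List.mem_map.mpr ⟨v, by rw [PySem.List.mem_pyRange_one]; exact ⟨hv.2.1, hv.2.2⟩, rfl⟩⟩
  · rintro ⟨p, hp, hread, hgu, hgv, hab⟩
    rw [List.mem_flatMap] at hp
    obtain ⟨u, hu, hp2⟩ := hp
    rw [List.mem_map] at hp2
    obtain ⟨v, hv, rfl⟩ := hp2
    rw [PySem.List.mem_pyRange_one] at hu hv
    refine ⟨by exact_mod_cast fun h => hab (by exact_mod_cast h), ?_⟩
    rw [List.any_eq_true]
    refine ⟨u, (mem_membersOf _ hnd _ _ _).mpr ⟨hgu, hu.1, hu.2⟩, ?_⟩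
    rw [List.any_eq_true]
    exact ⟨v, (mem_membersOf _ hnd _ _ _).mpr ⟨hgv, hv.1, hv.2⟩, by rw [beq_iff_eq]; exact hread⟩

theorem E_eq_getElem2 (m : List (List Int)) (a b : Nat) (ha : a < m.length)
    (hb : b < (m[a]).length) : E m a b = m[a][b] := by
  rw [E_eq_getElem m a b ha, List.getD_eq_getElem?_getD, List.getElem?_eq_getElem hb, Option.getD_some]

theorem E_init (k a b : Nat) (ha : a < k) :
    E (List.replicate k (List.replicate k (0 : Int))) a b = 0 := by
  unfold E
  have h : (List.replicate k (List.replicate k (0 : Int))).getD a [] = List.replicate k 0 := by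
    rw [List.getD_eq_getElem?_getD, List.getElem?_replicate, if_pos ha, Option.getD_some]
  rw [h, List.getD_eq_getElem?_getD, List.getElem?_replicate]
  split
  · rfl
  · rfl

-- ===== VERDICT (by name: the statement is the Claim_ definition above) =====
theorem build_condensation_graph_spec : Claim_equal_build_condensation_graph := by
  intro M scc _ _
  unfold Spec_build_condensation_graph
  unfold build_condensation_graph build_condensation_graph_alt
  by_cases hk : scc.length = 0
  · simp [hk]
  · simp only [hk, if_false]
    refine Prod.ext ?_ rfl
    dsimp only
    rw [portA_fold_eq]
    set d := nodeMap scc with hd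
    set k := scc.length with hkk
    set ps := (PySem.List.pyRange 0 (M.length : Int) 1).flatMap
      (fun u => (PySem.List.pyRange 0 (M.length : Int) 1).map (fun v => (u, v))) with hps
    have hv : ∀ u i, d.get? u = some i → 0 ≤ i ∧ i < (k : Int) := nodeMap_values_lt scc
    have hinit : (List.replicate k (List.replicate k (0 : Int))).length = k := by simp
    have hinitr : ∀ r ∈ List.replicate k (List.replicate k (0 : Int)), r.length = k := by
      intro r hr; rw [List.eq_of_mem_replicate hr]; simp
    obtain ⟨hlen, hrows, hent⟩ := entry_fold M d k hv ps _ hinit hinitr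
    apply List.ext_getElem
    · simp [hlen, PySem.List.length_pyRange_one]
    · intro a h1 h2
      rw [List.getElem_map]
      apply List.ext_getElem
      · have := hrows _ (List.getElem_mem h1)
        simp [this, PySem.List.length_pyRange_one]
      · intro b hb1 hb2
        rw [List.getElem_map]
        simp only [PySem.List.getElem_pyRange_one, zero_add]
        have hak : a < k := by rw [hlen] at h1; exact h1
        have hbk : b < k := by
          have := hrows _ (List.getElem_mem h1); rw [this] at hb1; exact hb1
        have hE : E (ps.foldl (stepA M d) (List.replicate k (List.replicate k 0))) a b
            = (ps.foldl (stepA M d) (List.replicate k (List.replicate k 0)))[a][b] :=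
          E_eq_getElem2 _ a b h1 hb1
        rw [← hE]
        have hma : PySem.List.pyGetD ((PySem.List.pyRange 0 (k : Int) 1).map
            (fun i => membersOf d (M.length : Int) i)) (a : Int) []
            = membersOf d (M.length : Int) (a : Int) :=
          PySem.List.pyGetD_map_pyRange_of_nonneg _ _ _ _ (by omega) (by exact_mod_cast hak)
        have hmb : PySem.List.pyGetD ((PySem.List.pyRange 0 (k : Int) 1).map
            (fun i => membersOf d (M.length : Int) i)) (b : Int) []
            = membersOf d (M.length : Int) (b : Int) :=
          PySem.List.pyGetD_map_pyRange_of_nonneg _ _ _ _ (by omega) (by exact_mod_cast hbk)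
        by_cases hc : ((a : Int) ≠ (b : Int)) ∧
            ((PySem.List.pyGetD ((PySem.List.pyRange 0 (k : Int) 1).map
                (fun i => membersOf d (M.length : Int) i)) (a : Int) []).any (fun u =>
              (PySem.List.pyGetD ((PySem.List.pyRange 0 (k : Int) 1).map
                (fun i => membersOf d (M.length : Int) i)) (b : Int) []).any (fun v =>
                ((PySem.List.pyGet? M u).bind (fun row => PySem.List.pyGet? row v)) == some 1)) = true)
        · rw [if_pos hc]
          rw [hma, hmb] at hc
          exact (hent a b hak hbk).1 ((cond_iff M scc a b).mp hc)
        · rw [if_neg hc]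
          refine Eq.trans ((hent a b hak hbk).2 (fun hex => hc ?_)) (E_init k a b hak)
          rw [hma, hmb]
          exact (cond_iff M scc a b).mpr hex
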